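-- pv_equiv track=rewrite | github.com/olofmeister442/temp | engine/utils.py | replace_if_statement
-- ===== SOURCE A (Python) =====
-- def replace_if_statement(sentence):
--     string = ""
--     sentence = sentence.replace('<p>', '')
--     sentence = sentence.replace('</p>', '')
--     string_answer_1 = ""
--     string_answer_2 = ""
--     condition = ""
--     start_flag = False
--     start_flag_2 = False
--     start_flag_3 = False
--     final_flag = False
--     for words in sentence.split():
--         if words == "}}}":
--             start_flag = False
--         if start_flag == True:
--             string_answer_1 += words + " "
--         if words == "{{{":
--             start_flag = True
--         if words == "}}}}":
--             start_flag_2 = False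
--         if start_flag_2 == True:
--             string_answer_2 += words + " "
--         if words == "{{{{":
--             start_flag_2 = True
--         if words == "))}":
--             start_flag_3 = False
--             final_flag = True
--         if start_flag_3 == True:
--             condition += words + " "
--         if words == "{((":
--             start_flag_3 = True
--     condition = condition.replace(" ", "")
--
--     if final_flag == True:
--         if condition != "nan" and condition != "":
--             return string_answer_1
--         else:
--             return string_answer_2
--     else:
--         return sentence
-- ===== SOURCE B (Python) =====
-- def replace_if_statement(sentence):
--     sentence = sentence.replace('<p>', '').replace('</p>', '')
--     tokens = sentence.split()
--
--     def segments(lst, closer):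
--         # split the token list on every occurrence of the closer marker
--         segs = []
--         while closer in lst:
--             cut = lst.index(closer)
--             segs.append(lst[:cut])
--             lst = lst[cut + 1:]
--         segs.append(lst)
--         return segs
--
--     def tail_after(seg, opener):
--         # tokens strictly after the first opener marker of a closer-free segment
--         if opener in seg:
--             return seg[seg.index(opener) + 1:]
--         return []
--
--     def collect(opener, closer):
--         segs = segments(tokens, closer)
--         words = [w for seg in segs for w in tail_after(seg, opener)]
--         return ''.join(w + ' ' for w in words), len(segs) > 1
--
--     answer_1, _ = collect('{{{', '}}}')
--     answer_2, _ = collect('{{{{', '}}}}')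
--     cond, final_flag = collect('{((', '))}')
--     condition = cond.replace(' ', '')
--     if final_flag:
--         if condition != 'nan' and condition != '':
--             return answer_1
--         return answer_2
--     return sentence
-- ===== Notes on version B (the rewrite author's own statement) =====
-- stated objective: alternative
-- what changed: Replaces the single streaming loop with four interleaved boolean state machines by a positional decomposition: the token list is split on each closer marker via index/slicing into closer-free segments, the extracted text is the suffix after the first opener of each segment, and the final flag becomes the check that the split produced at least two segments.
import Mathlib
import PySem

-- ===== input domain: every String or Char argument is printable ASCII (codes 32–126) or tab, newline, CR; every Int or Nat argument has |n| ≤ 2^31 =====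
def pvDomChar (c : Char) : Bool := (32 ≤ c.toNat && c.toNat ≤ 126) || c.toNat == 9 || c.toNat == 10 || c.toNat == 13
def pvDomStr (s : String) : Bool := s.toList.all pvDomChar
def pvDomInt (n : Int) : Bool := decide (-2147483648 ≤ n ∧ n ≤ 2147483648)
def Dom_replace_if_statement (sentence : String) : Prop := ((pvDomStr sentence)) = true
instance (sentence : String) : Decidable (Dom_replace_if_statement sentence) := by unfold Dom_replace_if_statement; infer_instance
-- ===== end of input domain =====

-- B replaces A's single streaming loop with four interleaved boolean state machines by a
-- positional decomposition: split the token list on each closer marker (index + slices) into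
-- closer-free segments, take the suffix after the first opener of each segment, and read the
-- final flag as "more than one segment"; objective: alternative.

-- ===== PORT A =====
-- one step of A's loop body; state = (string_answer_1, string_answer_2, condition,
-- start_flag, start_flag_2, start_flag_3, final_flag), updated in A's statement order
def pvAStep (st : String × String × String × Bool × Bool × Bool × Bool) (words : String) :
    String × String × String × Bool × Bool × Bool × Bool :=
  match st with
  | (a1, a2, cond, f1, f2, f3, fin) =>
    let f1 := if words == "}}}" then false else f1
    let a1 := if f1 then a1 ++ words ++ " " else a1
    let f1 := if words == "{{{" then true else f1
    let f2 := if words == "}}}}" then false else f2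
    let a2 := if f2 then a2 ++ words ++ " " else a2
    let f2 := if words == "{{{{" then true else f2
    let f3 := if words == "))}" then false else f3
    let fin := if words == "))}" then true else fin
    let cond := if f3 then cond ++ words ++ " " else cond
    let f3 := if words == "{((" then true else f3
    (a1, a2, cond, f1, f2, f3, fin)

def replace_if_statement (sentence : String) : String :=
  let sentence := PySem.Str.replace sentence "<p>" ""
  let sentence := PySem.Str.replace sentence "</p>" ""
  match (PySem.Str.split₀ sentence).foldl pvAStep ("", "", "", false, false, false, false) with
  | (a1, a2, cond, _, _, _, fin) =>
    let cond := PySem.Str.replace cond " " ""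
    if fin then (if cond ≠ "nan" ∧ cond ≠ "" then a1 else a2) else sentence

-- ===== PORT B =====
-- Source B's `segments`: split the token list on every occurrence of the closer marker.
-- Python's `while closer in lst: cut = lst.index(closer)` is the match on PySem.List.index?
-- (some ↔ closer in lst); lst[:cut] and lst[cut+1:] are PySem slices with nonnegative bounds.
def pvSegments (cl : String) (lst : List String) : List (List String) :=
  match h : PySem.List.index? lst cl with
  | some cut =>
      PySem.List.slice lst none (some (cut : Int)) ::
        pvSegments cl (PySem.List.slice lst (some ((cut : Int) + 1)) none)
  | none => [lst]
termination_by lst.length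
decreasing_by
  obtain ⟨hk, -, -⟩ := PySem.List.getElem_of_index?_eq_some h
  rw [show ((cut : Int) + 1) = (((cut + 1 : Nat)) : Int) by push_cast; ring,
    PySem.List.slice_from_natCast]
  simp only [List.length_drop]
  omega

-- Source B's `tail_after`: tokens strictly after the first opener of a closer-free segment
def pvTailAfter (op : String) (seg : List String) : List String :=
  match PySem.List.index? seg op with
  | some i => PySem.List.slice seg (some ((i : Int) + 1)) none
  | none => []

-- Source B's `collect`
def pvCollect (tokens : List String) (op cl : String) : String × Bool :=
  let segs := pvSegments cl tokens
  let words := segs.flatMap (pvTailAfter op)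
  (PySem.Str.join "" (words.map (fun w => w ++ " ")), decide (segs.length > 1))

def replace_if_statement_alt (sentence : String) : String :=
  let s := PySem.Str.replace (PySem.Str.replace sentence "<p>" "") "</p>" ""
  let tokens := PySem.Str.split₀ s
  let answer_1 := (pvCollect tokens "{{{" "}}}").1
  let answer_2 := (pvCollect tokens "{{{{" "}}}}").1
  let cf := pvCollect tokens "{((" "))}"
  let condition := PySem.Str.replace cf.1 " " ""
  if cf.2 then (if condition ≠ "nan" ∧ condition ≠ "" then answer_1 else answer_2) else s

-- ===== PRECONDITION & SPEC =====
def Spec_replace_if_statement (sentence : String) (out : String) : Prop := out = replace_if_statement_alt sentence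
instance (sentence : String) (out : String) : Decidable (Spec_replace_if_statement sentence out) := by unfold Spec_replace_if_statement; infer_instance

-- ===== CLAIM (what is proved, stated in full; the proofs are below) =====
def Claim_equal_replace_if_statement : Prop := ∀ (sentence : String), Dom_replace_if_statement sentence → Spec_replace_if_statement sentence (replace_if_statement sentence)

-- ===== LEMMAS AND PROOFS =====

-- proof-side abstraction of ONE of A's flag machines: pick the tokens seen while the flag is set
def pvPickStep (opener closer : String) (st : Bool × List String) (t : String) :
    Bool × List String :=
  let f := if t == closer then false else st.1
  let acc := if f then st.2 ++ [t] else st.2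
  let f := if t == opener then true else f
  (f, acc)

-- the string A accumulates for a picked token list: each token followed by one space
def pvJ (ws : List String) : String := PySem.Str.join "" (ws.map (fun w => w ++ " "))

-- the pick fold's accumulator factors out
theorem pvPick_acc (op cl : String) (toks : List String) (f : Bool) (acc : List String) :
    toks.foldl (pvPickStep op cl) (f, acc) =
      ((toks.foldl (pvPickStep op cl) (f, [])).1,
       acc ++ (toks.foldl (pvPickStep op cl) (f, [])).2) := by
  induction toks generalizing f acc with
  | nil => simp
  | cons t rest ih =>
    simp only [List.foldl_cons, pvPickStep]
    have ih1 := fun (f : Bool) (w : String) => ih f [w]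
    rw [ih]
    split_ifs <;> simp [ih1]

theorem pvIntercalateNil {α : Type} (xs : List (List α)) : List.intercalate [] xs = xs.flatten := by
  induction xs with
  | nil => rfl
  | cons a t ih => cases t <;> simp_all [List.intercalate, List.intersperse]

theorem pvJ_toList (ws : List String) :
    (pvJ ws).toList = (ws.map (fun w => w.toList ++ [' '])).flatten := by
  have hsp : (" " : String).toList = [' '] := rfl
  simp [pvJ, PySem.Str.toList_join, PySem.Chars.join, pvIntercalateNil, List.map_map,
    Function.comp_def, String.toList_append, hsp]

theorem pvJ_nil : pvJ [] = "" := by rfl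

theorem pvJ_cons (w : String) (ws : List String) : pvJ (w :: ws) = w ++ (" " ++ pvJ ws) := by
  rw [← String.toList_inj]
  simp [pvJ_toList, String.toList_append]

-- A's fold, expressed through three independent pick machines and a membership test
theorem pvFold_eq (toks : List String) (a1 a2 cond : String) (f1 f2 f3 fin : Bool) :
    toks.foldl pvAStep (a1, a2, cond, f1, f2, f3, fin) =
      (a1 ++ pvJ (toks.foldl (pvPickStep "{{{" "}}}") (f1, [])).2,
       a2 ++ pvJ (toks.foldl (pvPickStep "{{{{" "}}}}") (f2, [])).2,
       cond ++ pvJ (toks.foldl (pvPickStep "{((" "))}") (f3, [])).2,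
       (toks.foldl (pvPickStep "{{{" "}}}") (f1, [])).1,
       (toks.foldl (pvPickStep "{{{{" "}}}}") (f2, [])).1,
       (toks.foldl (pvPickStep "{((" "))}") (f3, [])).1,
       fin || toks.contains "))}") := by
  induction toks generalizing a1 a2 cond f1 f2 f3 fin with
  | nil => simp [pvJ_nil]
  | cons t rest ih =>
    simp only [List.foldl_cons, pvAStep, pvPickStep, List.contains_cons, List.nil_append]
    rw [ih]
    rw [pvPick_acc "{{{" "}}}" rest _ (if (if (t == "}}}") = true then false else f1) = true then [t] else []),
        pvPick_acc "{{{{" "}}}}" rest _ (if (if (t == "}}}}") = true then false else f2) = true then [t] else []),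
        pvPick_acc "{((" "))}" rest _ (if (if (t == "))}") = true then false else f3) = true then [t] else [])]
    simp only [Prod.mk.injEq]
    refine ⟨?_, ?_, ?_, trivial, trivial, trivial, ?_⟩
    · split_ifs <;> simp [pvJ_cons, String.append_assoc]
    · split_ifs <;> simp [pvJ_cons, String.append_assoc]
    · split_ifs <;> simp [pvJ_cons, String.append_assoc]
    · cases fin <;> cases h : (t == "))}") <;> simp [h] <;>
        first
        | rfl
        | (intro he; subst he; simp at h)
        | (have : t = "))}" := by simpa using h
           subst this; simp)

-- unfolding equations for pvSegments
theorem pvSegments_eq_some (cl : String) (l : List String) (cut : Nat)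
    (h : PySem.List.index? l cl = some cut) :
    pvSegments cl l =
      PySem.List.slice l none (some (cut : Int)) ::
        pvSegments cl (PySem.List.slice l (some ((cut : Int) + 1)) none) := by
  rw [pvSegments]
  split
  · rename_i cut' heq
    rw [heq] at h
    injection h with h
    subst h
    rfl
  · rename_i heq
    rw [heq] at h
    cases h

theorem pvSegments_eq_none (cl : String) (l : List String)
    (h : PySem.List.index? l cl = none) : pvSegments cl l = [l] := by
  rw [pvSegments]
  split
  · rename_i cut' heq
    rw [heq] at h
    cases h
  · rfl

theorem pvSegments_ne_nil (cl : String) (l : List String) : pvSegments cl l ≠ [] := by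
  cases h : PySem.List.index? l cl with
  | some cut => rw [pvSegments_eq_some cl l cut h]; simp
  | none => rw [pvSegments_eq_none cl l h]; simp

-- B's final flag is A's membership test
theorem pvSegLen (cl : String) (l : List String) :
    decide ((pvSegments cl l).length > 1) = l.contains cl := by
  cases h : PySem.List.index? l cl with
  | some cut =>
    rw [pvSegments_eq_some cl l cut h]
    have hm : cl ∈ l := by
      have hs : (PySem.List.index? l cl).isSome := by rw [h]; rfl
      rw [PySem.List.index?_isSome_iff] at hs
      exact hs
    have hne := pvSegments_ne_nil cl (PySem.List.slice l (some ((cut : Int) + 1)) none)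
    cases hseg : pvSegments cl (PySem.List.slice l (some ((cut : Int) + 1)) none) with
    | nil => exact absurd hseg hne
    | cons s ss => simp [hm]
  | none =>
    rw [pvSegments_eq_none cl l h]
    rw [PySem.List.index?_eq_none_iff] at h
    simp [h]

-- a pick machine with the flag set and no closer in sight accumulates everything
theorem pvL0 (op cl : String) (l : List String) (hcl : cl ∉ l) :
    l.foldl (pvPickStep op cl) (true, []) = (true, l) := by
  induction l with
  | nil => rfl
  | cons t rest ih =>
    have ht : (t == cl) = false := by
      simp only [beq_eq_false_iff_ne]; exact fun he => hcl (he ▸ List.mem_cons_self ..)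
    have hstep : pvPickStep op cl (true, ([] : List String)) t = (true, [t]) := by
      simp [pvPickStep, ht]
    rw [List.foldl_cons, hstep, pvPick_acc, ih (fun hm => hcl (List.mem_cons_of_mem _ hm))]
    rfl

-- on a closer-free segment the pick machine from a cleared flag is `tail_after`
theorem pvL1 (op cl : String) (l : List String) (hcl : cl ∉ l) :
    (l.foldl (pvPickStep op cl) (false, [])).2 = pvTailAfter op l := by
  induction l with
  | nil => rfl
  | cons t rest ih =>
    have ht : (t == cl) = false := by
      simp only [beq_eq_false_iff_ne]; exact fun he => hcl (he ▸ List.mem_cons_self ..)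
    have hrest : cl ∉ rest := fun hm => hcl (List.mem_cons_of_mem _ hm)
    by_cases hop : t = op
    · rw [hop] at ht ⊢
      have hstep : pvPickStep op cl (false, ([] : List String)) op = (true, []) := by
        simp [pvPickStep, ht]
      rw [List.foldl_cons, hstep, pvL0 op cl rest hrest]
      unfold pvTailAfter
      rw [PySem.List.index?_cons_self]
      dsimp only
      rw [show (((0 : Nat) : Int) + 1) = 1 by norm_num, PySem.List.slice_from_one]
      rfl
    · have hop' : (t == op) = false := by simp [hop]
      have hstep : pvPickStep op cl (false, ([] : List String)) t = (false, []) := by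
        simp [pvPickStep, ht, hop']
      rw [List.foldl_cons, hstep, ih hrest]
      unfold pvTailAfter
      rw [show PySem.List.index? (t :: rest) op = (PySem.List.index? rest op).map (· + 1) from
        PySem.List.index?_cons_of_ne _ hop]
      cases hi : PySem.List.index? rest op with
      | none => simp
      | some i =>
        simp only [Option.map_some]
        rw [show ((i : Int) + 1) = (((i + 1 : Nat)) : Int) by push_cast; ring,
          show (((i + 1 : Nat) : Int) + 1) = (((i + 2 : Nat)) : Int) by push_cast; ring,
          PySem.List.slice_from_natCast, PySem.List.slice_from_natCast]
        simp [List.drop_succ_cons]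

-- MAIN: one of A's pick machines equals B's split-on-closer / suffix-after-opener reading
theorem pvMain (op cl : String) (hne : (cl == op) = false) (l : List String) :
    (l.foldl (pvPickStep op cl) (false, [])).2 =
      (pvSegments cl l).flatMap (pvTailAfter op) := by
  cases h : PySem.List.index? l cl with
  | none =>
    rw [pvSegments_eq_none cl l h]
    rw [PySem.List.index?_eq_none_iff] at h
    rw [pvL1 op cl l h]
    simp
  | some cut =>
    rw [PySem.List.index?_eq_some_iff] at h
    obtain ⟨pre, suf, hsplit, hlen, hpre⟩ := h
    have h' : PySem.List.index? l cl = some cut := by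
      rw [PySem.List.index?_eq_some_iff]
      exact ⟨pre, suf, hsplit, hlen, hpre⟩
    have h1 : PySem.List.slice l none (some (cut : Int)) = pre := by
      rw [PySem.List.slice_to_natCast, hsplit, ← hlen, List.take_left]
    have h2 : PySem.List.slice l (some ((cut : Int) + 1)) none = suf := by
      rw [show ((cut : Int) + 1) = (((cut + 1 : Nat)) : Int) by push_cast; ring,
        PySem.List.slice_from_natCast, hsplit, ← hlen]
      rw [show pre ++ cl :: suf = (pre ++ [cl]) ++ suf by simp,
        show pre.length + 1 = (pre ++ [cl]).length by simp]
      exact List.drop_left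
    rw [pvSegments_eq_some cl l cut h', h1, h2]
    have hstep : ∀ st : Bool × List String, pvPickStep op cl st cl = (false, st.2) := by
      intro st
      simp [pvPickStep, hne]
    rw [hsplit, List.foldl_append, List.foldl_cons, hstep]
    rw [pvPick_acc, pvL1 op cl pre hpre,
      pvMain op cl hne suf]
    simp
termination_by l.length
decreasing_by
  simp only [hsplit]
  simp
  omega

-- ===== VERDICT (by name: the statement is the Claim_ definition above) =====
theorem replace_if_statement_spec : Claim_equal_replace_if_statement := by
  intro sentence _
  show replace_if_statement sentence = replace_if_statement_alt sentence
  unfold replace_if_statement replace_if_statement_alt pvCollect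
  dsimp only
  generalize PySem.Str.replace (PySem.Str.replace sentence "<p>" "") "</p>" "" = s
  generalize PySem.Str.split₀ s = toks
  rw [pvFold_eq]
  simp only [String.empty_append, Bool.false_or]
  rw [pvMain "{{{" "}}}" (by decide), pvMain "{{{{" "}}}}" (by decide),
    pvMain "{((" "))}" (by decide), ← pvSegLen "))}"]
  simp only [pvJ]
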